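-- pv_equiv track=rewrite | github.com/icrphysics/RSStaticCodeChecker | RSStaticCodeChecker/static_code_checker/generated/argument_change_180.py | argumentsRight
-- ===== SOURCE A (Python) =====
-- def argumentsRight(d):
--     args = ["RoiGeometryNames","CreateNewRois","ReferenceExaminationName","TargetExaminationNames","Transformations"]
--     too_many = []
--     for keyword in d.get("keywords", []):
--         if keyword.get("arg") in args:
--             args.remove(keyword.get("arg"))
--         else:
--             too_many.append(keyword.get("arg"))
--     if not too_many and not args:
--         return True
--     return (0 if too_many else 3)
-- ===== SOURCE B (Python) =====
-- def argumentsRight(d):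
--     expected = {"RoiGeometryNames", "CreateNewRois", "ReferenceExaminationName",
--                 "TargetExaminationNames", "Transformations"}
--     counts = {}
--     for keyword in d.get("keywords", []):
--         a = keyword.get("arg")
--         counts[a] = counts.get(a, 0) + 1
--     too_many = any(a not in expected or c > 1 for a, c in counts.items())
--     missing = any(name not in counts for name in expected)
--     if not too_many and not missing:
--         return True
--     return 0 if too_many else 3
-- ===== Notes on version B (the rewrite author's own statement) =====
-- stated objective: alternative
-- what changed: Replaces A's destructive loop that removes matched names from the expected list (membership tested against the shrinking list) by a single counting pass building a frequency dict, followed by two independent any() checks against a fixed expected set.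
import Mathlib
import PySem

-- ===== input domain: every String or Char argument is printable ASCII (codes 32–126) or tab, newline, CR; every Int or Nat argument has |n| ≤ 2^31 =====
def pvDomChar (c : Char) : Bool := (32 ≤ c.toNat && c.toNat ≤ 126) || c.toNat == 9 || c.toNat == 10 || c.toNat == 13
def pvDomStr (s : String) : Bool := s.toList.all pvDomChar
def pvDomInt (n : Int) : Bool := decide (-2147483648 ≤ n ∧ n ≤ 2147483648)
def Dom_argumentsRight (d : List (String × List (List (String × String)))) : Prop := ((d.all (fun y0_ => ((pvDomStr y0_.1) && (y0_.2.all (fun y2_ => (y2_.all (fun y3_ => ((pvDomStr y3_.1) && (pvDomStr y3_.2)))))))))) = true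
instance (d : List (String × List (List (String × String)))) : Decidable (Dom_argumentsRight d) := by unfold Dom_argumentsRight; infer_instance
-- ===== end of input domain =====

-- B replaces A's destructive remove-from-expected-list loop by a single counting pass
-- (a frequency dict) followed by two independent any() checks; objective: alternative/simpler control flow.

-- ===== PORT A =====
def pvExpected : List String :=
  ["RoiGeometryNames", "CreateNewRois", "ReferenceExaminationName",
   "TargetExaminationNames", "Transformations"]

-- one iteration of A's for-loop: state = (args, too_many)
def pvStepA (st : List String × List (Option String)) (a : Option String) :
    List String × List (Option String) :=
  match a with
  | some s => if s ∈ st.1 then ((PySem.List.remove? st.1 s).getD st.1, st.2)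
              else (st.1, st.2 ++ [a])
  | none => (st.1, st.2 ++ [a])

def argumentsRight (d : List (String × List (List (String × String)))) : Int :=
  let kws := (PySem.Dict.ofList d).getD "keywords" []
  let st := kws.foldl (fun st kw => pvStepA st ((PySem.Dict.ofList kw).get? "arg")) (pvExpected, [])
  if st.2 = [] ∧ st.1 = [] then 1
  else if st.2 ≠ [] then 0 else 3

-- ===== PORT B =====
def argumentsRight_alt (d : List (String × List (List (String × String)))) : Int :=
  let expected := PySem.Set.ofList pvExpected
  let kws := (PySem.Dict.ofList d).getD "keywords" []
  let counts := kws.foldl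
    (fun c kw =>
      let a := (PySem.Dict.ofList kw).get? "arg"
      c.insert a (c.getD a 0 + 1))
    (PySem.Dict.empty : PySem.Dict (Option String) Int)
  let tooMany := counts.items.any (fun p =>
    (match p.1 with | some s => decide (s ∉ expected) | none => true) || decide (1 < p.2))
  let missing := expected.any (fun name => !(counts.contains (some name)))
  if tooMany = false ∧ missing = false then 1
  else if tooMany then 0 else 3

-- ===== PRECONDITION & SPEC =====
def Spec_argumentsRight (d : List (String × List (List (String × String)))) (out : Int) : Prop := out = argumentsRight_alt d
instance (d : List (String × List (List (String × String)))) (out : Int) : Decidable (Spec_argumentsRight d out) := by unfold Spec_argumentsRight; infer_instance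

-- ===== CLAIM (what is proved, stated in full; the proofs are below) =====
def Claim_equal_argumentsRight : Prop := ∀ (d : List (String × List (List (String × String)))), Dom_argumentsRight d → Spec_argumentsRight d (argumentsRight d)

-- ===== LEMMAS AND PROOFS =====

-- A's loop over the list of extracted "arg" values
def pvLoopA (as : List (Option String)) (st : List String × List (Option String)) :
    List String × List (Option String) := as.foldl pvStepA st

theorem pvLoopA_fst (as : List (Option String)) (args : List String)
    (tm : List (Option String)) (h : args.Nodup) :
    (pvLoopA as (args, tm)).1 = args.filter (fun s => !(decide (some s ∈ as))) := by
  induction as generalizing args tm with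
  | nil => simp [pvLoopA]
  | cons a rest ih =>
    match a with
    | none =>
      simp only [pvLoopA, List.foldl_cons, pvStepA]
      rw [show (List.foldl pvStepA (args, tm ++ [none]) rest) = pvLoopA rest (args, tm ++ [none]) from rfl,
        ih args _ h]
      simp
    | some s =>
      by_cases hs : s ∈ args
      · simp only [pvLoopA, List.foldl_cons, pvStepA, hs, if_true]
        rw [PySem.List.remove?_eq_some_erase args s hs]
        rw [show (List.foldl pvStepA ((some (args.erase s)).getD args, tm) rest) = pvLoopA rest (args.erase s, tm) from rfl,
          ih _ _ (h.erase s)]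
        rw [h.erase_eq_filter s, List.filter_filter]
        apply List.filter_congr
        intro t _
        by_cases hts : t = s <;> simp [hts]
      · simp only [pvLoopA, List.foldl_cons, pvStepA, hs, if_false]
        rw [show (List.foldl pvStepA (args, tm ++ [some s]) rest) = pvLoopA rest (args, tm ++ [some s]) from rfl,
          ih args _ h]
        apply List.filter_congr
        intro t ht
        have : t ≠ s := fun e => hs (e ▸ ht)
        simp [this]

theorem pvLoopA_snd_eq_nil (as : List (Option String)) (args : List String)
    (tm : List (Option String)) (h : args.Nodup) :
    (pvLoopA as (args, tm)).2 = [] ↔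
      tm = [] ∧ ∀ a ∈ as, (∃ s ∈ args, a = some s) ∧ as.count a = 1 := by
  induction as generalizing args tm with
  | nil => simp [pvLoopA]
  | cons a rest ih =>
    match a with
    | none =>
      simp only [pvLoopA, List.foldl_cons, pvStepA]
      rw [show (List.foldl pvStepA (args, tm ++ [none]) rest) = pvLoopA rest (args, tm ++ [none]) from rfl,
        ih args _ h]
      constructor
      · rintro ⟨h1, -⟩; simp at h1
      · rintro ⟨-, hall⟩
        rcases (hall none (by simp)).1 with ⟨s, -, hs⟩
        simp at hs
    | some s =>
      by_cases hs : s ∈ args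
      · simp only [pvLoopA, List.foldl_cons, pvStepA, hs, if_true]
        rw [PySem.List.remove?_eq_some_erase args s hs]
        rw [show (List.foldl pvStepA ((some (args.erase s)).getD args, tm) rest) = pvLoopA rest (args.erase s, tm) from rfl,
          ih _ _ (h.erase s)]
        constructor
        · rintro ⟨h1, hall⟩
          refine ⟨h1, ?_⟩
          have hns : some s ∉ rest := by
            intro hmem
            rcases (hall _ hmem).1 with ⟨t, ht, hteq⟩
            cases hteq
            exact ((h.mem_erase_iff).1 ht).1 rfl
          intro a ha
          rcases List.mem_cons.1 ha with rfl | ha'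
          · exact ⟨⟨s, hs, rfl⟩, by simp [List.count_eq_zero.2 hns]⟩
          · rcases hall a ha' with ⟨⟨t, ht, rfl⟩, hcnt⟩
            have htne : t ≠ s := ((h.mem_erase_iff).1 ht).1
            refine ⟨⟨t, List.mem_of_mem_erase ht, rfl⟩, ?_⟩
            simp [Ne.symm htne, hcnt]
        · rintro ⟨h1, hall⟩
          refine ⟨h1, ?_⟩
          intro a ha
          rcases hall a (List.mem_cons_of_mem _ ha) with ⟨⟨t, ht, rfl⟩, hcnt⟩
          have htne : t ≠ s := by
            rintro rfl
            have : (some t :: rest).count (some t) = rest.count (some t) + 1 := by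
              simp
            have hpos : 0 < rest.count (some t) := List.count_pos_iff.2 ha
            omega
          refine ⟨⟨t, (h.mem_erase_iff).2 ⟨htne, ht⟩, rfl⟩, ?_⟩
          have : (some s :: rest).count (some t) = rest.count (some t) := by
            simp [Ne.symm htne]
          omega
      · simp only [pvLoopA, List.foldl_cons, pvStepA, hs, if_false]
        rw [show (List.foldl pvStepA (args, tm ++ [some s]) rest) = pvLoopA rest (args, tm ++ [some s]) from rfl,
          ih args _ h]
        constructor
        · rintro ⟨h1, -⟩; simp at h1
        · rintro ⟨-, hall⟩
          rcases (hall (some s) (by simp)).1 with ⟨t, ht, hteq⟩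
          cases hteq
          exact (hs ht).elim

theorem main_eq (d : List (String × List (List (String × String)))) :
    argumentsRight d = argumentsRight_alt d := by
  simp only [argumentsRight, argumentsRight_alt]
  set kws := (PySem.Dict.ofList d).getD "keywords" [] with hk
  set as : List (Option String) := kws.map (fun kw => (PySem.Dict.ofList kw).get? "arg") with has
  have hnd : pvExpected.Nodup := by decide
  have hA : (kws.foldl (fun st kw => pvStepA st ((PySem.Dict.ofList kw).get? "arg")) (pvExpected, ([] : List (Option String)))) = pvLoopA as (pvExpected, []) := by
    rw [has, pvLoopA, List.foldl_map]
  have hB : (kws.foldl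
      (fun c kw =>
        let a := (PySem.Dict.ofList kw).get? "arg"
        c.insert a (c.getD a 0 + 1))
      (PySem.Dict.empty : PySem.Dict (Option String) Int)) = PySem.Dict.counter as := by
    rw [has, ← PySem.Dict.foldl_insert_getD_add_one_eq_counter, List.foldl_map]
  rw [hA, hB]
  have hexp : PySem.Set.ofList pvExpected = pvExpected := PySem.Set.ofList_eq_self_of_nodup pvExpected hnd
  rw [hexp, PySem.Dict.items_counter, List.any_map]
  set T : Bool := List.any (PySem.Set.ofList as)
        ((fun p : Option String × Int =>
            (match p.1 with
              | some s => decide (s ∉ pvExpected)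
              | none => true) ||
              decide (1 < p.2)) ∘
          fun k => (k, (List.count k as : Int))) with hTdef
  set M : Bool := (pvExpected.any fun name => !(PySem.Dict.counter as).contains (some name)) with hMdef
  have hM : (M = false) ↔ (pvLoopA as (pvExpected, [])).1 = [] := by
    rw [hMdef]
    rw [pvLoopA_fst as pvExpected [] hnd]
    simp [List.any_eq_false, List.filter_eq_nil_iff, PySem.Dict.contains_counter]
  have hT : (T = false) ↔ (pvLoopA as (pvExpected, [])).2 = [] := by
    rw [hTdef, pvLoopA_snd_eq_nil as pvExpected [] hnd]
    simp only [List.any_eq_false, Function.comp, PySem.Set.mem_ofList, true_and]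
    constructor
    · intro hall a ha
      have h := hall a ha
      have hcpos : 0 < as.count a := List.count_pos_iff.2 ha
      cases a with
      | none => simp at h
      | some s =>
        simp only [Bool.or_eq_true, not_or, decide_eq_true_eq, not_lt, not_not] at h
        obtain ⟨h1, h2⟩ := h
        have hle : as.count (some s) ≤ 1 := by exact_mod_cast h2
        exact ⟨⟨s, h1, rfl⟩, by omega⟩
    · intro hall a ha h
      obtain ⟨⟨s, hsmem, rfl⟩, hc⟩ := hall a ha
      simp [hsmem, hc] at h
  by_cases h2 : (pvLoopA as (pvExpected, [])).2 = [] <;>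
    by_cases h1 : (pvLoopA as (pvExpected, [])).1 = []
  · simp [h2, h1, hT.mpr h2, hM.mpr h1]
  · have ht := hT.mpr h2
    have hm : M = true := by
      rw [← Bool.not_eq_false]; exact fun hf => h1 (hM.mp hf)
    simp [h2, h1, ht, hm]
  · have ht : T = true := by
      rw [← Bool.not_eq_false]; exact fun hf => h2 (hT.mp hf)
    simp [h2, h1, ht]
  · have ht : T = true := by
      rw [← Bool.not_eq_false]; exact fun hf => h2 (hT.mp hf)
    simp [h2, h1, ht]

-- ===== VERDICT (by name: the statement is the Claim_ definition above) =====
theorem argumentsRight_spec : Claim_equal_argumentsRight := by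
  intro d _
  exact main_eq d
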